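-- pv_equiv track=rewrite | github.com/lilyandcy/python3 | leetcode/findPairs2.py | findPairs2
-- ===== SOURCE A (Python) =====
-- def findPairs2(nums, k):
--     """
--     :type nums: List[int]
--     :type k: int
--     :rtype: int
--     """
--     rnum = 0
--     numsdict = {}
--     if k != 0:
--         nums = list(set(nums))
--         nums.sort()
--         for i in range(len(nums)):
--             numsdict[nums[i]+k] = nums[i]
--             if nums[i] in numsdict.keys():
--                 rnum = rnum + 1
--         return rnum
--     else:
--         nums1 = list(set(nums))
--         for num in nums1:
--             if nums.count(num) > 1:
--                 rnum = rnum + 1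
--         return rnum
-- ===== SOURCE B (Python) =====
-- def findPairs2(nums, k):
--     if k < 0:
--         return 0
--     counts = {}
--     for x in nums:
--         counts[x] = counts.get(x, 0) + 1
--     if k == 0:
--         return sum(1 for c in counts.values() if c > 1)
--     return sum(1 for v in counts if v + k in counts)
-- ===== Notes on version B (the rewrite author's own statement) =====
-- stated objective: simpler
-- what changed: B replaces A's sort + interleaved shifted-key dict building (and, for k==0, repeated list.count scans) by one frequency-dict pass followed by a single scan over its keys, with an explicit 0 for k<0.
import Mathlib
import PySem

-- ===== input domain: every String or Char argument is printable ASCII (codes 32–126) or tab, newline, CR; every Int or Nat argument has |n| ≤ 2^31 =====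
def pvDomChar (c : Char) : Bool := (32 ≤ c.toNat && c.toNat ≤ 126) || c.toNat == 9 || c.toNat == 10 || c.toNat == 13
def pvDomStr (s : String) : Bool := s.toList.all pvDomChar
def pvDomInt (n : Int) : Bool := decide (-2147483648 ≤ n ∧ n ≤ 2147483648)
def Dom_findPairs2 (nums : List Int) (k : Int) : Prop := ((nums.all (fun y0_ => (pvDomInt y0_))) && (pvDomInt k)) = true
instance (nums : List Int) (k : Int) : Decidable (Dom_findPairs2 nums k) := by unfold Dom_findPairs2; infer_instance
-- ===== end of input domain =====

-- B builds one frequency dict in a single pass and answers with one scan over its keys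
-- (no sort, no repeated list.count, no interleaved shifted-key dict): objective = simpler.

-- ===== PORT A =====
-- loop body of A's k != 0 branch: numsdict[nums[i]+k] = nums[i]; if nums[i] in numsdict.keys(): rnum += 1
def findPairs2_step (k : Int) (st : PySem.Dict Int Int × Int) (x : Int) : PySem.Dict Int Int × Int :=
  let d := st.1.insert (x + k) x
  (d, if d.keys.contains x then st.2 + 1 else st.2)

def findPairs2 (nums : List Int) (k : Int) : Int :=
  if k ≠ 0 then
    -- nums = list(set(nums)); nums.sort()
    let nums2 := PySem.List.sorted (PySem.Set.ofList nums) (fun x => x)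
    -- for i in range(len(nums)): ...
    let st := (PySem.List.pyRange 0 (PySem.List.len nums2)).foldl
      (fun st i => findPairs2_step k st (PySem.List.pyGetD nums2 i 0))
      (PySem.Dict.empty, 0)
    st.2
  else
    let nums1 := PySem.Set.ofList nums
    nums1.foldl (fun rnum num => if 1 < PySem.List.count nums num then rnum + 1 else rnum) 0

-- ===== PORT B =====
def findPairs2_alt (nums : List Int) (k : Int) : Int :=
  if k < 0 then 0
  else
    let counts : PySem.Dict Int Int :=
      nums.foldl (fun d x => d.insert x (d.getD x 0 + 1)) PySem.Dict.empty
    if k = 0 then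
      ((counts.values.filter (fun c => decide (1 < c))).length : Int)
    else
      ((counts.keys.filter (fun v => counts.contains (v + k))).length : Int)

-- ===== PRECONDITION & SPEC =====
def Spec_findPairs2 (nums : List Int) (k : Int) (out : Int) : Prop := out = findPairs2_alt nums k
instance (nums : List Int) (k : Int) (out : Int) : Decidable (Spec_findPairs2 nums k out) := by unfold Spec_findPairs2; infer_instance

-- ===== CLAIM (what is proved, stated in full; the proofs are below) =====
def Claim_equal_findPairs2 : Prop := ∀ (nums : List Int) (k : Int), Dom_findPairs2 nums k → Spec_findPairs2 nums k (findPairs2 nums k)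

-- ===== LEMMAS AND PROOFS =====

-- closed form of A's k ≠ 0 loop: P is the list of already-processed values
def findPairs2_F (k : Int) : List Int → List Int → Int
  | _, [] => 0
  | P, x :: t => (if x - k ∈ P then (1 : Int) else 0) + findPairs2_F k (P ++ [x]) t

lemma findPairs2_loop_eq (k : Int) (hk : k ≠ 0) :
    ∀ (t P : List Int) (d : PySem.Dict Int Int) (r : Int),
      (∀ y, d.contains y = true ↔ y - k ∈ P) →
      (t.foldl (findPairs2_step k) (d, r)).2 = r + findPairs2_F k P t := by
  intro t
  induction t with
  | nil => intro P d r _; simp [findPairs2_F]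
  | cons x t ih =>
    intro P d r hinv
    have hxx : ((x == x + k) : Bool) = false := by
      rw [beq_eq_false_iff_ne]; omega
    have hcond : ((d.insert (x + k) x).keys.contains x = true) ↔ x - k ∈ P := by
      rw [List.contains_iff_mem, ← PySem.Dict.contains_iff_mem_keys,
        PySem.Dict.contains_insert, hxx, Bool.false_or]
      exact hinv x
    have hinv' : ∀ y, (d.insert (x + k) x).contains y = true ↔ y - k ∈ P ++ [x] := by
      intro y
      rw [PySem.Dict.contains_insert]
      simp only [Bool.or_eq_true, beq_iff_eq, hinv y, List.mem_append, List.mem_singleton]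
      constructor
      · rintro (h | h)
        · right; omega
        · left; exact h
      · rintro (h | h)
        · right; exact h
        · left; omega
    simp only [List.foldl_cons, findPairs2_F]
    have hstep : findPairs2_step k (d, r) x
        = (d.insert (x + k) x, if (d.insert (x + k) x).keys.contains x then r + 1 else r) := rfl
    cases hb : ((d.insert (x + k) x).keys.contains x) with
    | true =>
      have hmem : x - k ∈ P := hcond.mp hb
      rw [hstep, hb, if_pos rfl, ih (P ++ [x]) _ _ hinv', if_pos hmem]
      ring
    | false =>
      have hmem : x - k ∉ P := fun h => by rw [hcond.mpr h] at hb; exact Bool.true_eq_false ▸ hb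
      rw [hstep, hb, if_neg (by simp), ih (P ++ [x]) _ _ hinv', if_neg hmem]
      ring

lemma findPairs2_F_neg (k : Int) (hk : k < 0) :
    ∀ (t P : List Int), (P ++ t).Pairwise (· < ·) → findPairs2_F k P t = 0 := by
  intro t
  induction t with
  | nil => intro P _; simp [findPairs2_F]
  | cons x t ih =>
    intro P hp
    have hxP : x - k ∉ P := by
      intro hmem
      have : (x - k) < x := (List.pairwise_append.mp hp).2.2 _ hmem x (List.mem_cons_self)
      omega
    have hp' : ((P ++ [x]) ++ t).Pairwise (· < ·) := by
      rw [List.append_assoc]; simpa using hp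
    simp [findPairs2_F, hxP, ih (P ++ [x]) hp']

lemma findPairs2_F_pos (k : Int) (hk : 0 < k) :
    ∀ (t P : List Int), (P ++ t).Pairwise (· < ·) →
      findPairs2_F k P t = (t.countP (fun x => decide (x - k ∈ P ++ t)) : Int) := by
  intro t
  induction t with
  | nil => intro P _; simp [findPairs2_F]
  | cons x t ih =>
    intro P hp
    have hpair := List.pairwise_append.mp hp
    have hxt : x - k ∉ x :: t := by
      intro hmem
      rcases List.mem_cons.mp hmem with h | h
      · omega
      · have : x < x - k := (List.pairwise_cons.mp hpair.2.1).1 _ h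
        omega
    have hhead : (x - k ∈ P ++ x :: t) ↔ x - k ∈ P := by
      simp only [List.mem_append]
      exact ⟨fun h => h.resolve_right hxt, Or.inl⟩
    have hp' : ((P ++ [x]) ++ t).Pairwise (· < ·) := by
      rw [List.append_assoc]; simpa using hp
    have htail : ∀ y ∈ t, (decide (y - k ∈ (P ++ [x]) ++ t) : Bool) = decide (y - k ∈ P ++ x :: t) := by
      intro y _; rw [List.append_assoc]; simp
    simp only [findPairs2_F, List.countP_cons]
    rw [ih (P ++ [x]) hp', List.countP_congr (fun y hy => by rw [htail y hy])]
    rcases Decidable.em (x - k ∈ P) with hmem | hmem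
    · simp [hmem, hhead.mpr hmem]; ring
    · have : x - k ∉ P ++ x :: t := fun h => hmem (hhead.mp h)
      simp [hmem, this]

-- counting bijection: #{x ∈ S | x - k ∈ S} = #{v ∈ S | v + k ∈ S} on a Nodup list
lemma findPairs2_count_shift (S : List Int) (hnd : S.Nodup) (k : Int) :
    (S.filter (fun x => decide (x - k ∈ S))).length
      = (S.filter (fun v => decide (v + k ∈ S))).length := by
  have h1 : (S.filter (fun x => decide (x - k ∈ S))).length
      = (S.toFinset.filter (fun x => x - k ∈ S.toFinset)).card := by
    rw [← List.toFinset_card_of_nodup (hnd.filter _), List.toFinset_filter]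
    congr 1
    apply Finset.filter_congr
    intro x _; simp
  have h2 : (S.filter (fun v => decide (v + k ∈ S))).length
      = (S.toFinset.filter (fun v => v + k ∈ S.toFinset)).card := by
    rw [← List.toFinset_card_of_nodup (hnd.filter _), List.toFinset_filter]
    congr 1
    apply Finset.filter_congr
    intro x _; simp
  rw [h1, h2]
  apply Finset.card_bij' (i := fun x _ => x - k) (j := fun v _ => v + k)
  · intro a ha
    simp only [Finset.mem_filter] at ha ⊢
    exact ⟨ha.2, by simpa using ha.1⟩
  · intro a ha
    simp only [Finset.mem_filter] at ha ⊢
    exact ⟨ha.2, by simpa using ha.1⟩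
  · intro a _; ring
  · intro a _; ring

-- ===== VERDICT (by name: the statement is the Claim_ definition above) =====
theorem findPairs2_spec : Claim_equal_findPairs2 := by
  intro nums k _
  unfold Spec_findPairs2 findPairs2 findPairs2_alt
  set S := PySem.Set.ofList nums with hS
  have hemp : ∀ y : Int, (PySem.Dict.empty : PySem.Dict Int Int).contains y = true ↔ y - k ∈ ([] : List Int) := by
    intro y; simp [PySem.Dict.contains, PySem.Dict.empty]
  rcases lt_trichotomy k 0 with hk | hk | hk
  · -- k < 0 : A's loop never fires; B returns 0
    have hkne : k ≠ 0 := by omega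
    rw [if_pos hkne, if_pos hk]
    simp only []
    rw [PySem.List.foldl_pyRange_pyGetD _ _ _ _ (le_refl 0)]
    simp only [Int.toNat_zero, List.drop_zero]
    rw [findPairs2_loop_eq k hkne _ [] _ 0 hemp,
      findPairs2_F_neg k hk _ [] (by simpa using PySem.List.sorted_ofList_pairwise_lt nums)]
    omega
  · -- k = 0 : both count distinct values occurring more than once
    subst hk
    rw [if_neg (by simp), if_neg (by omega), if_pos rfl]
    simp only []
    rw [PySem.Dict.foldl_insert_getD_add_one_eq_counter]
    have hfold : (S.foldl (fun rnum num => if 1 < PySem.List.count nums num then rnum + 1 else rnum) 0)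
        = 0 + ((S.countP (fun num => decide (1 < PySem.List.count nums num))) : Int) := by
      rw [show (fun (rnum : Int) num => if 1 < PySem.List.count nums num then rnum + 1 else rnum)
            = (fun (rnum : Int) num => if (fun num => decide (1 < PySem.List.count nums num)) num = true then rnum + 1 else rnum) from by
          funext rnum num; rcases Decidable.em (1 < PySem.List.count nums num) with h | h
          · rw [if_pos h, if_pos (by simpa using h)]
          · rw [if_neg h, if_neg (by simpa using h)]]
      exact PySem.List.foldl_count_if _ _ _
    rw [hfold, zero_add]
    have hvals : (PySem.Dict.counter nums).values
        = S.map (fun v => (nums.count v : Int)) := by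
      show ((PySem.Dict.counter nums).items.map Prod.snd) = _
      rw [PySem.Dict.items_counter]
      simp only [List.map_map, Function.comp_def]
      rw [← hS]
    rw [hvals, List.filter_map, List.length_map, ← List.countP_eq_length_filter]
    congr 1
    apply List.countP_congr
    intro v _
    simp [PySem.List.count_eq, Function.comp]
  · -- k > 0 : A counts x with x-k present, B counts v with v+k present
    have hkne : k ≠ 0 := by omega
    rw [if_pos hkne, if_neg (by omega), if_neg hkne]
    simp only []
    rw [PySem.Dict.foldl_insert_getD_add_one_eq_counter]
    rw [PySem.List.foldl_pyRange_pyGetD _ _ _ _ (le_refl 0)]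
    simp only [Int.toNat_zero, List.drop_zero]
    rw [findPairs2_loop_eq k hkne _ [] _ 0 hemp]
    set s := PySem.List.sorted S (fun x => x) with hs
    have hF : findPairs2_F k [] s = ((s.countP (fun x => decide (x - k ∈ s))) : Int) := by
      rw [findPairs2_F_pos k hk s [] (by simpa using PySem.List.sorted_ofList_pairwise_lt nums)]
      exact congrArg _ (List.countP_congr (fun x _ => by simp))
    rw [hF, zero_add]
    -- left side: countP over the sorted list = countP over S
    have hperm : s.Perm S := PySem.List.sorted_perm S _ _
    have hL : s.countP (fun x => decide (x - k ∈ s))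
        = S.countP (fun x => decide (x - k ∈ S)) := by
      rw [List.countP_congr (q := fun x => decide (x - k ∈ S))
        (fun x _ => by simp [hperm.mem_iff])]
      exact hperm.countP_eq _
    rw [hL]
    -- right side: B's filter over the counter's keys
    have hR : (List.filter (fun v => (PySem.Dict.counter nums).contains (v + k)) (PySem.Dict.counter nums).keys).length
        = S.countP (fun v => decide (v + k ∈ S)) := by
      rw [PySem.Dict.keys_counter, ← List.countP_eq_length_filter]
      apply List.countP_congr
      intro v _
      rw [PySem.Dict.contains_counter]
      simp [hS, PySem.Set.mem_ofList]
    rw [hR, List.countP_eq_length_filter, List.countP_eq_length_filter,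
      findPairs2_count_shift S (PySem.Set.nodup_ofList nums) k]
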